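-- pv_equiv track=rewrite | github.com/abbasmoosajee07/EverybodyCodes | 2024/18/2024Day18.py | bfs_from_border
-- ===== SOURCE A (Python) =====
-- from collections import deque
--
-- def count_palms(grid):
--     """Counts the number of palms ('P') in the grid."""
--     return sum(row.count('P') for row in grid)
--
-- def bfs_from_border(grid):
--     """Performs BFS from open cells in the border to find the shortest path to all palms."""
--     rows = len(grid)
--     cols = len(grid[0])
--     directions = [(-1, 0), (1, 0), (0, -1), (0, 1)]
--
--     queue = deque([(0, row, col) for row in range(rows) for col in [0, cols - 1] if grid[row][col] == '.'])
--     num_palms = count_palms(grid)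
--     visited = set()
--
--     while queue:
--         distance, row, col = queue.popleft()
--
--         if (row, col) in visited:
--             continue
--         visited.add((row, col))
--
--         if grid[row][col] == 'P':
--             num_palms -= 1
--             if num_palms == 0:
--                 return distance
--
--         for dr, dc in directions:
--             new_row, new_col = row + dr, col + dc
--             if 0 <= new_row < rows and 0 <= new_col < cols and grid[new_row][new_col] != '#':
--                 queue.append((distance + 1, new_row, new_col))
--
--     return -1
-- ===== SOURCE B (Python) =====
-- def bfs_from_border(grid):
--     """Level-synchronous BFS: frontier list per distance, visited marked at enqueue time."""
--     rows, cols = len(grid), len(grid[0])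
--     palms = sum(row.count('P') for row in grid)
--     visited = set()
--     frontier = []
--     for r in range(rows):
--         for c in (0, cols - 1):
--             if grid[r][c] == '.' and (r, c) not in visited:
--                 visited.add((r, c))
--                 frontier.append((r, c))
--     dist = 0
--     while frontier:
--         for r, c in frontier:
--             if grid[r][c] == 'P':
--                 palms -= 1
--                 if palms == 0:
--                     return dist
--         nxt = []
--         for r, c in frontier:
--             for dr, dc in ((-1, 0), (1, 0), (0, -1), (0, 1)):
--                 nr, nc = r + dr, c + dc
--                 if 0 <= nr < rows and 0 <= nc < cols and grid[nr][nc] != '#' and (nr, nc) not in visited: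
--                     visited.add((nr, nc))
--                     nxt.append((nr, nc))
--         frontier = nxt
--         dist += 1
--     return -1
-- ===== Notes on version B (the rewrite author's own statement) =====
-- stated objective: alternative
-- what changed: Replaces A's single (distance,row,col) deque with pop-time duplicate skipping by a level-synchronous BFS: nested loops over whole frontiers with an explicit distance counter, duplicates filtered at enqueue time, so no per-node distance tags are stored.
-- outside the precondition, e.g. on bfs_from_border([]): A raises IndexError, B raises IndexError; on bfs_from_border(['ab', 'c']): A raises IndexError, B raises IndexError
import Mathlib
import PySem

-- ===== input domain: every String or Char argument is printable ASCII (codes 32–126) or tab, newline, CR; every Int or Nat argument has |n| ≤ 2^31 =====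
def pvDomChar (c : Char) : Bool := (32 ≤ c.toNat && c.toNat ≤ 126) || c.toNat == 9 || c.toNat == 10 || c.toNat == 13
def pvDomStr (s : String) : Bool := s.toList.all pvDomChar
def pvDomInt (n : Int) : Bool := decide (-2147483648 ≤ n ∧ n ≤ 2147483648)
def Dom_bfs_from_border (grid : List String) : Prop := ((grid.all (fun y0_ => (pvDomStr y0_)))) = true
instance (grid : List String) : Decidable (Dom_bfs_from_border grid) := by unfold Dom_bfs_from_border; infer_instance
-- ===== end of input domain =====

-- B replaces A's (distance,cell) deque by a level-synchronous BFS (whole-frontier rounds with an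
-- explicit distance counter, duplicates filtered at enqueue time); same return value, no speed claim proved here.

abbrev pvCell := Int × Int

-- ===== PORT A =====
-- grid[r][c]; the `none` branch (IndexError) is never taken on the indices A touches under Pre_; '?' is junk for that dead branch
def pvGetCell (grid : List String) (r c : Int) : Char :=
  ((PySem.List.pyGet? grid r).bind fun s => PySem.Str.pyGet? s c).getD '?'

-- count_palms(grid) = sum(row.count('P') for row in grid)  (helper of A; B's source inlines the same expression)
def pvCountPalms (grid : List String) : Int :=
  (grid.map fun row => (PySem.Str.count row "P" : Int)).sum

-- directions = [(-1,0),(1,0),(0,-1),(0,1)]  (the same literal appears in both sources)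
def pvDirs : List (Int × Int) := [(-1, 0), (1, 0), (0, -1), (0, 1)]

-- '0 <= nr < rows and 0 <= nc < cols and grid[nr][nc] != "#"'  (identical test in both sources)
def pvOpenB (grid : List String) (rows cols nr nc : Int) : Bool :=
  decide (0 ≤ nr ∧ nr < rows ∧ 0 ≤ nc ∧ nc < cols ∧ pvGetCell grid nr nc ≠ '#')

-- A's while-loop over the deque; fuel only makes the recursion structural (the 0-case is dead for the
-- fuel bfs_from_border passes, as the equivalence proof below shows by never reaching it)
def pvLoopA (grid : List String) (rows cols : Int) :
    Nat → List (Int × pvCell) → PySem.Set pvCell → Int → Int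
  | _, [], _, _ => -1
  | 0, _ :: _, _, _ => -1
  | fuel + 1, (d, rc) :: q, visited, palms =>
    if PySem.Set.contains visited rc then pvLoopA grid rows cols fuel q visited palms
    else
      let visited' := PySem.Set.add visited rc
      if pvGetCell grid rc.1 rc.2 = 'P' then
        if palms - 1 = 0 then d
        else pvLoopA grid rows cols fuel
          (q ++ pvDirs.filterMap fun dd =>
            if pvOpenB grid rows cols (rc.1 + dd.1) (rc.2 + dd.2) then
              some (d + 1, (rc.1 + dd.1, rc.2 + dd.2)) else none)
          visited' (palms - 1)
      else pvLoopA grid rows cols fuel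
          (q ++ pvDirs.filterMap fun dd =>
            if pvOpenB grid rows cols (rc.1 + dd.1) (rc.2 + dd.2) then
              some (d + 1, (rc.1 + dd.1, rc.2 + dd.2)) else none)
          visited' palms

def bfs_from_border (grid : List String) : Int :=
  let rows : Int := grid.length
  let row0 : String := PySem.List.pyGetD grid 0 ""      -- grid[0]; IndexError iff grid = [] (outside Pre_)
  let cols : Int := PySem.Str.len row0
  let queue0 : List (Int × pvCell) :=
    (PySem.List.pyRange 0 rows).flatMap fun r =>
      ([0, cols - 1] : List Int).filterMap fun c =>
        if pvGetCell grid r c = '.' then some ((0 : Int), (r, c)) else none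
  let palms := pvCountPalms grid
  pvLoopA grid rows cols (queue0.length + 5 * (grid.length * row0.toList.length) + 1) queue0
    PySem.Set.empty palms

-- ===== PORT B =====
-- 'if x not in visited: visited.add(x); out.append(x)'
def pvStep (st : PySem.Set pvCell × List pvCell) (x : pvCell) : PySem.Set pvCell × List pvCell :=
  if PySem.Set.contains st.1 x then st else (PySem.Set.add st.1 x, st.2 ++ [x])

-- B's first per-level loop: decrement palms on each frontier palm, early return (none) when it hits 0
def pvLevelPalms (grid : List String) : List pvCell → Int → Option Int
  | [], palms => some palms
  | rc :: rest, palms =>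
    if pvGetCell grid rc.1 rc.2 = 'P' then
      if palms - 1 = 0 then none
      else pvLevelPalms grid rest (palms - 1)
    else pvLevelPalms grid rest palms

-- B's second per-level loop: collect unvisited in-bounds non-'#' neighbours, marking visited at enqueue
def pvNext (grid : List String) (rows cols : Int) (frontier : List pvCell)
    (visited : PySem.Set pvCell) : PySem.Set pvCell × List pvCell :=
  frontier.foldl (fun st rc =>
    pvDirs.foldl (fun st dd =>
      if pvOpenB grid rows cols (rc.1 + dd.1) (rc.2 + dd.2) then
        pvStep st (rc.1 + dd.1, rc.2 + dd.2) else st) st) (visited, [])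

-- B's while-loop, one recursion step per distance level (fuel 0 dead for the fuel passed below)
def pvLoopB (grid : List String) (rows cols : Int) :
    Nat → List pvCell → PySem.Set pvCell → Int → Int → Int
  | _, [], _, _, _ => -1
  | 0, _ :: _, _, _, _ => -1
  | fuel + 1, rc :: frontier, visited, palms, dist =>
    match pvLevelPalms grid (rc :: frontier) palms with
    | none => dist
    | some palms' =>
      let st := pvNext grid rows cols (rc :: frontier) visited
      pvLoopB grid rows cols fuel st.2 st.1 palms' (dist + 1)

def bfs_from_border_alt (grid : List String) : Int :=
  let rows : Int := grid.length
  let row0 : String := PySem.List.pyGetD grid 0 ""      -- grid[0]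
  let cols : Int := PySem.Str.len row0
  let palms := pvCountPalms grid
  let init := (PySem.List.pyRange 0 rows).foldl (fun st r =>
      ([0, cols - 1] : List Int).foldl (fun st c =>
        if pvGetCell grid r c = '.' then pvStep st (r, c) else st) st)
    (PySem.Set.empty, ([] : List pvCell))
  pvLoopB grid rows cols (grid.length * row0.toList.length + 1) init.2 init.1 palms 0

-- ===== PRECONDITION & SPEC =====
-- Pre_ is exactly A's non-raising domain: A indexes grid[0] (so the grid must be nonempty) and
-- grid[row][0] / grid[row][cols-1] for every row (so cols ≥ 1 and no row shorter than cols);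
-- anywhere outside this A raises IndexError.
def Pre_bfs_from_border (grid : List String) : Prop :=
  grid ≠ [] ∧ 1 ≤ PySem.Str.len (PySem.List.pyGetD grid 0 "") ∧
    ∀ s ∈ grid, PySem.Str.len (PySem.List.pyGetD grid 0 "") ≤ PySem.Str.len s
instance (grid : List String) : Decidable (Pre_bfs_from_border grid) := by
  unfold Pre_bfs_from_border; infer_instance

def pvWitness_bfs_from_border : List String := ["P.", ".#"]

def Spec_bfs_from_border (grid : List String) (out : Int) : Prop := out = bfs_from_border_alt grid
instance (grid : List String) (out : Int) : Decidable (Spec_bfs_from_border grid out) := by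
  unfold Spec_bfs_from_border; infer_instance

-- ===== CLAIM (what is proved, stated in full; the proofs are below) =====
def Claim_equal_bfs_from_border : Prop := ∀ (grid : List String), Dom_bfs_from_border grid →
  Pre_bfs_from_border grid → Spec_bfs_from_border grid (bfs_from_border grid)

-- ===== LEMMAS AND PROOFS =====

-- in-bounds predicate for a cell
def pvInB (rows cols : Int) (x : pvCell) : Prop := 0 ≤ x.1 ∧ x.1 < rows ∧ 0 ≤ x.2 ∧ x.2 < cols

-- first-occurrence dedup of a candidate list against an already-visited set
def pvDedup (vis : PySem.Set pvCell) : List pvCell → List pvCell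
  | [] => []
  | x :: xs => if x ∈ vis then pvDedup vis xs else x :: pvDedup (vis ++ [x]) xs

-- the raw neighbour list A appends for a newly visited cell (untagged)
def pvNbrs (grid : List String) (rows cols : Int) (rc : pvCell) : List pvCell :=
  pvDirs.filterMap fun dd =>
    if pvOpenB grid rows cols (rc.1 + dd.1) (rc.2 + dd.2) then
      some (rc.1 + dd.1, rc.2 + dd.2) else none

-- the border '.' cells, in scan order
def pvRowStarts (grid : List String) (cols : Int) (r : Int) : List pvCell :=
  ([0, cols - 1] : List Int).filterMap fun c =>
    if pvGetCell grid r c = '.' then some (r, c) else none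

def pvStarts (grid : List String) (rows cols : Int) : List pvCell :=
  (PySem.List.pyRange 0 rows).flatMap (pvRowStarts grid cols)

lemma pvNbrs_tagged (grid : List String) (rows cols d : Int) (rc : pvCell) :
    (pvDirs.filterMap fun dd =>
      if pvOpenB grid rows cols (rc.1 + dd.1) (rc.2 + dd.2) then
        some (d + 1, (rc.1 + dd.1, rc.2 + dd.2)) else none)
    = (pvNbrs grid rows cols rc).map (fun x => (d + 1, x)) := by
  simp only [pvNbrs, pvDirs, List.filterMap_cons, List.filterMap_nil]
  split_ifs <;> simp

lemma pvDedup_subset {vis : PySem.Set pvCell} {l : List pvCell} :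
    ∀ x ∈ pvDedup vis l, x ∈ l := by
  induction l generalizing vis with
  | nil => simp [pvDedup]
  | cons y ys ih =>
    intro x hx
    by_cases hy : y ∈ vis
    · simp only [pvDedup, if_pos hy] at hx
      exact List.mem_cons_of_mem _ (ih _ hx)
    · simp only [pvDedup, if_neg hy] at hx
      rcases List.mem_cons.1 hx with h | h
      · simp [h]
      · exact List.mem_cons_of_mem _ (ih _ h)

lemma pvNodup_append_dedup {vis : PySem.Set pvCell} (hv : vis.Nodup) (l : List pvCell) :
    (vis ++ pvDedup vis l).Nodup := by
  induction l generalizing vis with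
  | nil => simpa [pvDedup] using hv
  | cons x xs ih =>
    by_cases hx : x ∈ vis
    · simpa [pvDedup, hx] using ih hv
    · have hv' : (vis ++ [x]).Nodup := by
        rw [List.nodup_append]
        refine ⟨hv, List.nodup_singleton x, ?_⟩
        intro a ha b hb
        have hbx : b = x := by simpa using hb
        subst hbx
        exact fun heq => hx (heq ▸ ha)
      have := ih (vis := vis ++ [x]) hv'
      simpa [pvDedup, hx, List.append_assoc] using this

lemma pvMem_nbrs_inB {grid : List String} {rows cols : Int} {rc x : pvCell}
    (h : x ∈ pvNbrs grid rows cols rc) : pvInB rows cols x := by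
  simp only [pvNbrs, List.mem_filterMap] at h
  obtain ⟨dd, _, hdd⟩ := h
  split_ifs at hdd with hop
  · cases hdd
    simp only [pvOpenB, decide_eq_true_eq] at hop
    exact ⟨hop.1, hop.2.1, hop.2.2.1, hop.2.2.2.1⟩

lemma pvNbrs_len_le (grid : List String) (rows cols : Int) (F : List pvCell) :
    (F.flatMap (pvNbrs grid rows cols)).length ≤ 4 * F.length := by
  induction F with
  | nil => simp
  | cons x xs ih =>
    have hx : (pvNbrs grid rows cols x).length ≤ 4 :=
      List.length_filterMap_le _ _
    simp only [List.flatMap_cons, List.length_append, List.length_cons]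
    omega

lemma pvLen_le_rc {rows cols : Int} {l : List pvCell} (hn : l.Nodup)
    (hb : ∀ x ∈ l, pvInB rows cols x) : l.length ≤ rows.toNat * cols.toNat := by
  classical
  have hsub : l.toFinset ⊆ Finset.Icc (0 : Int) (rows - 1) ×ˢ Finset.Icc (0 : Int) (cols - 1) := by
    intro x hx
    obtain ⟨h1, h2, h3, h4⟩ := hb x (List.mem_toFinset.1 hx)
    simp only [Finset.mem_product, Finset.mem_Icc]
    exact ⟨⟨h1, by omega⟩, ⟨h3, by omega⟩⟩
  have hcard := Finset.card_le_card hsub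
  rw [List.toFinset_card_of_nodup hn] at hcard
  simpa [Finset.card_product, Int.card_Icc] using hcard

-- foldl of pvStep = append the deduped fresh elements to both components
lemma pvFoldl_step_spec (cand : List pvCell) :
    ∀ (vis : PySem.Set pvCell) (nxt : List pvCell),
      List.foldl pvStep (vis, nxt) cand = (vis ++ pvDedup vis cand, nxt ++ pvDedup vis cand) := by
  induction cand with
  | nil => intro vis nxt; simp [pvDedup]
  | cons x xs ih =>
    intro vis nxt
    by_cases hx : x ∈ vis
    · have hstep : pvStep (vis, nxt) x = (vis, nxt) := by simp [pvStep, hx]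
      rw [List.foldl_cons, hstep, ih]
      simp [pvDedup, hx]
    · have hstep : pvStep (vis, nxt) x = (vis ++ [x], nxt ++ [x]) := by
        simp [pvStep, hx]
      rw [List.foldl_cons, hstep, ih]
      simp [pvDedup, hx, List.append_assoc]

lemma pvInner_dirs (grid : List String) (rows cols : Int) (rc : pvCell)
    (st : PySem.Set pvCell × List pvCell) :
    pvDirs.foldl (fun st dd =>
      if pvOpenB grid rows cols (rc.1 + dd.1) (rc.2 + dd.2) then
        pvStep st (rc.1 + dd.1, rc.2 + dd.2) else st) st
    = List.foldl pvStep st (pvNbrs grid rows cols rc) := by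
  simp only [pvDirs, pvNbrs, List.filterMap_cons, List.filterMap_nil, List.foldl_cons,
    List.foldl_nil]
  split_ifs <;> simp

lemma pvNext_spec (grid : List String) (rows cols : Int) (F : List pvCell)
    (vis : PySem.Set pvCell) :
    pvNext grid rows cols F vis =
      (vis ++ pvDedup vis (F.flatMap (pvNbrs grid rows cols)),
       pvDedup vis (F.flatMap (pvNbrs grid rows cols))) := by
  have main : ∀ (l : List pvCell) (st : PySem.Set pvCell × List pvCell),
      l.foldl (fun st rc =>
        pvDirs.foldl (fun st dd =>
          if pvOpenB grid rows cols (rc.1 + dd.1) (rc.2 + dd.2) then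
            pvStep st (rc.1 + dd.1, rc.2 + dd.2) else st) st) st
      = List.foldl pvStep st (l.flatMap (pvNbrs grid rows cols)) := by
    intro l
    induction l with
    | nil => intro st; simp
    | cons x xs ih =>
      intro st
      rw [List.foldl_cons, pvInner_dirs, List.flatMap_cons, List.foldl_append, ih]
  unfold pvNext
  rw [main]
  have := pvFoldl_step_spec (F.flatMap (pvNbrs grid rows cols)) vis []
  simpa using this

lemma pvInit_spec (grid : List String) (rows cols : Int) :
    ((PySem.List.pyRange 0 rows).foldl (fun st r =>
        ([0, cols - 1] : List Int).foldl (fun st c =>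
          if pvGetCell grid r c = '.' then pvStep st (r, c) else st) st)
      (PySem.Set.empty, ([] : List pvCell)))
    = (pvDedup [] (pvStarts grid rows cols), pvDedup [] (pvStarts grid rows cols)) := by
  have inner : ∀ (r : Int) (st : PySem.Set pvCell × List pvCell),
      ([0, cols - 1] : List Int).foldl (fun st c =>
        if pvGetCell grid r c = '.' then pvStep st (r, c) else st) st
      = List.foldl pvStep st (pvRowStarts grid cols r) := by
    intro r st
    simp only [pvRowStarts, List.filterMap_cons, List.filterMap_nil, List.foldl_cons,
      List.foldl_nil]
    split_ifs <;> simp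
  have main : ∀ (l : List Int) (st : PySem.Set pvCell × List pvCell),
      l.foldl (fun st r =>
        ([0, cols - 1] : List Int).foldl (fun st c =>
          if pvGetCell grid r c = '.' then pvStep st (r, c) else st) st) st
      = List.foldl pvStep st (l.flatMap (pvRowStarts grid cols)) := by
    intro l
    induction l with
    | nil => intro st; simp
    | cons x xs ih =>
      intro st
      rw [List.foldl_cons, inner, List.flatMap_cons, List.foldl_append, ih]
  rw [main]
  have := pvFoldl_step_spec (pvStarts grid rows cols) PySem.Set.empty []
  simpa [pvStarts, PySem.Set.empty] using this

lemma pvQ0_eq (grid : List String) (rows cols : Int) :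
    ((PySem.List.pyRange 0 rows).flatMap fun r =>
      ([0, cols - 1] : List Int).filterMap fun c =>
        if pvGetCell grid r c = '.' then some ((0 : Int), (r, c)) else none)
    = (pvStarts grid rows cols).map (fun rc => ((0 : Int), rc)) := by
  simp only [pvStarts, List.map_flatMap]
  congr 1
  funext r
  simp only [pvRowStarts, List.filterMap_cons, List.filterMap_nil]
  split_ifs <;> simp

lemma pvMem_starts_inB {grid : List String} {rows cols : Int} (h1 : 1 ≤ cols) :
    ∀ x ∈ pvStarts grid rows cols, pvInB rows cols x := by
  intro x hx
  simp only [pvStarts, List.mem_flatMap] at hx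
  obtain ⟨r, hr, hx⟩ := hx
  have hr' := PySem.List.mem_pyRange_one.1 hr
  simp only [pvRowStarts, List.mem_filterMap, List.mem_cons] at hx
  obtain ⟨c, hc, hcc⟩ := hx
  split_ifs at hcc with h
  cases hcc
  rcases hc with rfl | hc'
  · exact ⟨hr'.1, hr'.2, le_refl 0, by omega⟩
  · have hcc' : c = cols - 1 := by simpa using hc'
    subst hcc'
    exact ⟨hr'.1, hr'.2, by omega, by omega⟩

-- A processes one whole distance level: pops |cur| entries, visits exactly the deduped fresh ones,
-- decrements palms in that order, and appends their raw neighbour lists at distance d+1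
lemma pvLevelA (grid : List String) (rows cols : Int) (d : Int) :
    ∀ (cur nxt : List pvCell) (vis : PySem.Set pvCell) (palms : Int) (fuel : Nat),
      cur.length ≤ fuel →
      pvLoopA grid rows cols fuel (cur.map (fun c => (d, c)) ++ nxt.map (fun c => (d + 1, c)))
        vis palms =
      (match pvLevelPalms grid (pvDedup vis cur) palms with
       | none => d
       | some palms' =>
          pvLoopA grid rows cols (fuel - cur.length)
            ((nxt ++ (pvDedup vis cur).flatMap (pvNbrs grid rows cols)).map (fun c => (d + 1, c)))
            (vis ++ pvDedup vis cur) palms') := by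
  intro cur
  induction cur with
  | nil => intro nxt vis palms fuel _; simp [pvDedup, pvLevelPalms]
  | cons x xs ih =>
    intro nxt vis palms fuel hfuel
    obtain ⟨f, rfl⟩ : ∃ f, fuel = f + 1 := by
      cases fuel with
      | zero => simp at hfuel
      | succ f => exact ⟨f, rfl⟩
    have hlen : xs.length ≤ f := by simpa using hfuel
    by_cases hx : x ∈ vis
    · have hc := (PySem.Set.contains_iff vis x).2 hx
      simp only [List.map_cons, List.cons_append, pvLoopA, hc, if_true]
      rw [ih nxt vis palms f hlen,
        show pvDedup vis (x :: xs) = pvDedup vis xs from by simp [pvDedup, hx],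
        List.length_cons, Nat.succ_sub_succ]
    · have hc : PySem.Set.contains vis x = false := by
        simpa using (fun h => hx ((PySem.Set.contains_iff vis x).1 h))
      have hadd : PySem.Set.add vis x = vis ++ [x] := PySem.Set.add_of_not_mem hx
      have hd : pvDedup vis (x :: xs) = x :: pvDedup (vis ++ [x]) xs := by
        simp [pvDedup, hx]
      simp only [List.map_cons, List.cons_append, pvLoopA, hc, Bool.false_eq_true, if_false, hadd]
      rw [hd]
      by_cases hp : pvGetCell grid x.1 x.2 = 'P'
      · by_cases hz : palms - 1 = 0
        · simp [hp, hz, pvLevelPalms]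
        · simp only [hp, if_true, hz, if_false]
          rw [pvNbrs_tagged grid rows cols d x, List.append_assoc, ← List.map_append]
          rw [ih (nxt ++ pvNbrs grid rows cols x) (vis ++ [x]) (palms - 1) f hlen]
          simp only [pvLevelPalms, hp, if_true, hz, if_false]
          cases hlev : pvLevelPalms grid (pvDedup (vis ++ [x]) xs) (palms - 1) with
          | none => rfl
          | some palms' =>
            simp only []
            congr 1
            · rw [List.length_cons, Nat.succ_sub_succ]
            · simp [List.flatMap_cons, List.append_assoc]
            · simp [List.append_assoc]
      · simp only [hp, if_false]
        rw [pvNbrs_tagged grid rows cols d x, List.append_assoc, ← List.map_append]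
        rw [ih (nxt ++ pvNbrs grid rows cols x) (vis ++ [x]) palms f hlen]
        simp only [pvLevelPalms, hp, if_false]
        cases hlev : pvLevelPalms grid (pvDedup (vis ++ [x]) xs) palms with
        | none => rfl
        | some palms' =>
          simp only []
          congr 1
          · rw [List.length_cons, Nat.succ_sub_succ]
          · simp [List.flatMap_cons, List.append_assoc]
          · simp [List.append_assoc]

lemma pvLoopA_nil (grid : List String) (rows cols : Int) (fuel : Nat)
    (vis : PySem.Set pvCell) (palms : Int) :
    pvLoopA grid rows cols fuel [] vis palms = -1 := by
  cases fuel <;> rfl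

lemma pvLoopB_nil (grid : List String) (rows cols : Int) (fuel : Nat)
    (vis : PySem.Set pvCell) (palms d : Int) :
    pvLoopB grid rows cols fuel [] vis palms d = -1 := by
  cases fuel <;> rfl

-- the simulation: A's deque run from a level start equals B's level-synchronous run
lemma pvSim (grid : List String) (rows cols : Int) :
    ∀ (fuelA : Nat) (fuelB : Nat) (cur : List pvCell) (vis : PySem.Set pvCell) (palms d : Int),
      vis.Nodup →
      (∀ x ∈ vis, pvInB rows cols x) →
      (∀ x ∈ cur, pvInB rows cols x) →
      cur.length + 5 * (rows.toNat * cols.toNat - vis.length) ≤ fuelA →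
      rows.toNat * cols.toNat + 1 - vis.length ≤ fuelB →
      pvLoopA grid rows cols fuelA (cur.map (fun c => (d, c))) vis palms =
      pvLoopB grid rows cols fuelB (pvDedup vis cur) (vis ++ pvDedup vis cur) palms d := by
  intro fuelA
  induction fuelA using Nat.strong_induction_on with
  | _ fuelA ihA =>
  intro fuelB cur vis palms d hnod hbv hbc hfA hfB
  set RC := rows.toNat * cols.toNat with hRC
  have hfuelcur : cur.length ≤ fuelA := by omega
  have hlev := pvLevelA grid rows cols d cur [] vis palms fuelA hfuelcur
  simp only [List.map_nil, List.append_nil, List.nil_append] at hlev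
  rw [hlev]
  have hFnodup : (vis ++ pvDedup vis cur).Nodup := pvNodup_append_dedup hnod cur
  have hFb : ∀ x ∈ pvDedup vis cur, pvInB rows cols x :=
    fun x hx => hbc x (pvDedup_subset x hx)
  have hVFb : ∀ x ∈ vis ++ pvDedup vis cur, pvInB rows cols x := by
    intro x hx
    rcases List.mem_append.1 hx with h | h
    · exact hbv x h
    · exact hFb x h
  have hlen2 : vis.length + (pvDedup vis cur).length ≤ rows.toNat * cols.toNat := by
    have := pvLen_le_rc hFnodup hVFb
    simpa [List.length_append] using this
  cases hF : pvDedup vis cur with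
  | nil =>
    simp [pvLevelPalms, pvLoopA_nil, pvLoopB_nil]
  | cons f0 F' =>
    have hvlen : vis.length ≤ rows.toNat * cols.toNat := by omega
    obtain ⟨g, rfl⟩ : ∃ g, fuelB = g + 1 := by
      cases fuelB with
      | zero => omega
      | succ g => exact ⟨g, rfl⟩
    rw [hF] at hFnodup hFb hVFb hlen2
    simp only [pvLoopB]
    cases hpl : pvLevelPalms grid (f0 :: F') palms with
    | none => rfl
    | some palms' =>
      simp only []
      rw [pvNext_spec grid rows cols (f0 :: F') (vis ++ f0 :: F')]
      have hcandb : ∀ x ∈ (f0 :: F').flatMap (pvNbrs grid rows cols), pvInB rows cols x := by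
        intro x hx
        obtain ⟨rc, _, hrc⟩ := List.mem_flatMap.1 hx
        exact pvMem_nbrs_inB hrc
      have hcandlen := pvNbrs_len_le grid rows cols (f0 :: F')
      have hcur1 : 1 ≤ cur.length := by
        cases cur with
        | nil => simp [pvDedup] at hF
        | cons a b => simp
      have hc4 : ((f0 :: F').flatMap (pvNbrs grid rows cols)).length ≤ 4 * (F'.length + 1) := by
        simpa using hcandlen
      have := ihA (fuelA - cur.length) (by omega) g
        ((f0 :: F').flatMap (pvNbrs grid rows cols)) (vis ++ f0 :: F') palms' (d + 1)
        hFnodup hVFb hcandb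
        (by
          simp only [List.length_append, List.length_cons] at hlen2 ⊢
          omega)
        (by
          simp only [List.length_append, List.length_cons] at hlen2 ⊢
          omega)
      rw [this]

lemma pvToNat_len (grid : List String) :
    (PySem.Str.len (PySem.List.pyGetD grid 0 "")).toNat
      = (PySem.List.pyGetD grid 0 "").toList.length := by
  rw [PySem.Str.len_eq]
  exact Int.toNat_natCast _

-- ===== VERDICT (by name: the statement is the Claim_ definition above) =====
theorem bfs_from_border_spec : Claim_equal_bfs_from_border := by
  intro grid _ hpre
  obtain ⟨hne, hcols, hrows⟩ := hpre
  unfold Spec_bfs_from_border bfs_from_border bfs_from_border_alt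
  simp only []
  rw [pvQ0_eq grid (grid.length : Int) (PySem.Str.len (PySem.List.pyGetD grid 0 "")),
    pvInit_spec grid (grid.length : Int) (PySem.Str.len (PySem.List.pyGetD grid 0 ""))]
  have hsim := pvSim grid (grid.length : Int) (PySem.Str.len (PySem.List.pyGetD grid 0 ""))
    ((pvStarts grid (grid.length : Int) (PySem.Str.len (PySem.List.pyGetD grid 0 ""))).length
      + 5 * (grid.length * (PySem.List.pyGetD grid 0 "").toList.length) + 1)
    (grid.length * (PySem.List.pyGetD grid 0 "").toList.length + 1)
    (pvStarts grid (grid.length : Int) (PySem.Str.len (PySem.List.pyGetD grid 0 "")))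
    ([] : PySem.Set pvCell) (pvCountPalms grid) 0
    (List.nodup_nil) (by intro x hx; cases hx)
    (pvMem_starts_inB hcols)
    (by
      rw [Int.toNat_natCast, pvToNat_len grid]
      omega)
    (by
      rw [Int.toNat_natCast, pvToNat_len grid]
      omega)
  simp only [PySem.Set.empty, List.length_map]
  rw [hsim]
  simp
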